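-- pv_equiv track=rewrite | github.com/joetache4/project-euler | 369_Badugi.py | on_3_lines
-- ===== SOURCE A (Python) =====
-- from itertools import combinations
-- from functools import reduce
--
-- bitsum = [0, 1, 1, 2, 1, 2, 2, 3, 1, 2, 2, 3, 2, 3, 3, 4] # OEIS A000120
--
-- def on_3_lines(rows):
-- 	if len(rows) <= 3:
-- 		return True
-- 	for comb in combinations(rows, len(rows)-2):
-- 		if bitsum[reduce(lambda x, y: x|y, comb)] <= 1:
-- 			return True
-- 	for comb in combinations(rows, len(rows)-1):
-- 		if bitsum[reduce(lambda x, y: x|y, comb)] <= 2: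
-- 			return True
-- 	return bitsum[reduce(lambda x, y: x|y, rows)] <= 3
-- ===== SOURCE B (Python) =====
-- def on_3_lines(rows):
--     if len(rows) <= 3:
--         return True
--     PC = [0, 1, 1, 2, 1, 2, 2, 3, 1, 2, 2, 3, 2, 3, 3, 4]
--     for m in range(16):
--         uncovered = sum(1 for r in rows if r & ~m & 15)
--         if uncovered <= 2 and PC[m] + uncovered <= 3:
--             return True
--     return False
-- ===== Notes on version B (the rewrite author's own statement) =====
-- stated objective: faster
-- what changed: A tests every (n-2)- and (n-1)-subset of the rows and ORs each subset; B instead counts, for each of the 16 possible 4-bit column masks m, how many rows are not covered by m and accepts iff popcount(m) + uncovered <= 3 with uncovered <= 2.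
-- outside the precondition, e.g. on on_3_lines([16, -1, -1, -1]): A returns False, B returns False
import Mathlib
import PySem

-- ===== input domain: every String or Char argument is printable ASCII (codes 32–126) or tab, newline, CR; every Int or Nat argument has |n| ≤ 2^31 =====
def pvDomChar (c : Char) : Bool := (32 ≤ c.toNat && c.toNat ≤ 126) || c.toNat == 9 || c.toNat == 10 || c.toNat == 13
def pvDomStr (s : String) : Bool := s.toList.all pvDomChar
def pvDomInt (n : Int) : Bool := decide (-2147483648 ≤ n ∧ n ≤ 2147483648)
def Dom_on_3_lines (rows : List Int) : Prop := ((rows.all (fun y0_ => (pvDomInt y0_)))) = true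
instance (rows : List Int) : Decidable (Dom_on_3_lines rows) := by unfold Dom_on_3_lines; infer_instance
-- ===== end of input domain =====

-- B replaces A's scan of all (n-2)- and (n-1)-subsets (O(n^3)) by one uncovered-row count
-- per candidate column mask over the fixed 16-mask universe (O(n)); measured faster.

-- ===== PORT A =====
def pvBitsum : List Int := [0, 1, 1, 2, 1, 2, 2, 3, 1, 2, 2, 3, 2, 3, 3, 4]

-- itertools.combinations(xs, k): all length-k subsequences of xs, in first-element-first order
def pvCombs : Nat → List Int → List (List Int)
  | 0, _ => [[]]
  | _ + 1, [] => []
  | k + 1, x :: xs => (pvCombs k xs).map (fun c => x :: c) ++ pvCombs (k + 1) xs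

-- reduce(lambda x, y: x | y, l); the [] case (reduce raises) is unreachable where A calls it
def pvReduceOr : List Int → Int
  | [] => 0
  | h :: t => t.foldl (fun x y => PySem.Int.bor x y) h

-- bitsum[v]: Python list indexing (negative wraparound); out of range = IndexError, which
-- Pre_ excludes; the getD default 5 makes every comparison below false there
def pvBitAt (v : Int) : Int := (PySem.List.pyGet? pvBitsum v).getD 5

def on_3_lines (rows : List Int) : Bool :=
  if rows.length ≤ 3 then true
  else if (pvCombs (rows.length - 2) rows).any (fun c => decide (pvBitAt (pvReduceOr c) ≤ 1)) then true
  else if (pvCombs (rows.length - 1) rows).any (fun c => decide (pvBitAt (pvReduceOr c) ≤ 2)) then true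
  else decide (pvBitAt (pvReduceOr rows) ≤ 3)

-- ===== PORT B =====
def pvPC : List Int := [0, 1, 1, 2, 1, 2, 2, 3, 1, 2, 2, 3, 2, 3, 3, 4]

def on_3_lines_alt (rows : List Int) : Bool :=
  if rows.length ≤ 3 then true
  else (PySem.List.pyRange 0 16 1).any (fun m =>
    let uncovered : Int :=
      ((rows.filter (fun r => decide (PySem.Int.band (PySem.Int.band r (Int.not m)) 15 ≠ 0))).length : Int)
    decide (uncovered ≤ 2 ∧ (PySem.List.pyGet? pvPC m).getD 0 + uncovered ≤ 3))

-- ===== PRECONDITION & SPEC =====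
-- Pre_ admits every list of ≤ 3 rows (A returns True unconditionally) and otherwise
-- requires the rows to lie in [-16, 15]: outside that range A's bitsum[...] lookups in
-- general raise IndexError (an OR outside bitsum's index range), and the values A does
-- return on such inputs (when every evaluated subset-OR happens to stay in range) arise
-- only through Python's accidental negative-index wraparound, not from the function's
-- 4-bit-mask domain.
def Pre_on_3_lines (rows : List Int) : Prop := rows.length ≤ 3 ∨ ∀ r ∈ rows, -16 ≤ r ∧ r ≤ 15
instance (rows : List Int) : Decidable (Pre_on_3_lines rows) := by unfold Pre_on_3_lines; infer_instance

def pvWitness_on_3_lines : List Int := [1, 2, 4, 8, 3]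

def Spec_on_3_lines (rows : List Int) (out : Bool) : Prop := out = on_3_lines_alt rows
instance (rows : List Int) (out : Bool) : Decidable (Spec_on_3_lines rows out) := by unfold Spec_on_3_lines; infer_instance

-- ===== CLAIM (what is proved, stated in full; the proofs are below) =====
def Claim_equal_on_3_lines : Prop := ∀ (rows : List Int), Dom_on_3_lines rows → Pre_on_3_lines rows → Spec_on_3_lines rows (on_3_lines rows)

-- ===== LEMMAS AND PROOFS =====

-- proof-side abbreviations
def pvOrL (l : List Int) : Int := l.foldl (fun x y => PySem.Int.bor x y) 0
def pvEnc (v : Int) : Nat := (PySem.Int.band v 31).toNat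
def pvR16 (v : Int) : Prop := -16 ≤ v ∧ v ≤ 15
def pvBad (m : Int) : Int → Bool := fun r => decide (PySem.Int.band (PySem.Int.band r (Int.not m)) 15 ≠ 0)

-- finite facts about the 5-bit universe
theorem pvFL1 (a b : Int) (ha : pvR16 a) (hb : pvR16 b) :
    pvR16 (PySem.Int.bor a b) ∧ pvEnc (PySem.Int.bor a b) = pvEnc a ||| pvEnc b := by
  obtain ⟨ha1, ha2⟩ := ha; obtain ⟨hb1, hb2⟩ := hb
  simp only [pvR16]
  interval_cases a <;> interval_cases b <;> decide

theorem pvFL2 (v : Int) (hv : pvR16 v) :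
    0 ≤ PySem.Int.band v 15 ∧ PySem.Int.band v 15 ≤ 15 ∧
    pvBitAt (PySem.Int.band v 15) = pvBitAt v ∧ (PySem.Int.band v 15).toNat = pvEnc v &&& 15 := by
  obtain ⟨h1, h2⟩ := hv; interval_cases v <;> decide

theorem pvFL3 (r m : Int) (hr : pvR16 r) (hm0 : 0 ≤ m) (hm1 : m ≤ 15) :
    (pvBad m r = false ↔ (pvEnc r &&& 15) ||| m.toNat = m.toNat) := by
  obtain ⟨h1, h2⟩ := hr; interval_cases r <;> interval_cases m <;> decide

theorem pvFL4 (v m : Int) (hv : pvR16 v) (hm0 : 0 ≤ m) (hm1 : m ≤ 15)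
    (hsub : (pvEnc v &&& 15) ||| m.toNat = m.toNat) : pvBitAt v ≤ pvBitAt m := by
  obtain ⟨h1, h2⟩ := hv
  interval_cases v <;> interval_cases m <;> revert hsub <;> decide

theorem pvRangeBounds : ∀ m ∈ PySem.List.pyRange 0 16 1,
    0 ≤ m ∧ m ≤ 15 ∧ 0 ≤ pvBitAt m ∧ pvBitAt m ≤ 4 ∧ (PySem.List.pyGet? pvPC m).getD 0 = pvBitAt m := by
  decide

theorem pvMemRange (m : Int) (hm0 : 0 ≤ m) (hm1 : m ≤ 15) : m ∈ PySem.List.pyRange 0 16 1 := by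
  interval_cases m <;> decide

-- fold of bor tracked through the 5-bit encoding
theorem pvFold_enc (l : List Int) (a : Int) (hl : ∀ r ∈ l, pvR16 r) (ha : pvR16 a) :
    pvR16 (l.foldl (fun x y => PySem.Int.bor x y) a) ∧
    pvEnc (l.foldl (fun x y => PySem.Int.bor x y) a) = (l.map pvEnc).foldl (· ||| ·) (pvEnc a) := by
  induction l generalizing a with
  | nil => exact ⟨ha, rfl⟩
  | cons x xs ih =>
    have hx := hl x (by simp)
    have h1 := pvFL1 a x ha hx
    have := ih (PySem.Int.bor a x) (fun r hr => hl r (List.mem_cons_of_mem _ hr)) h1.1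
    simpa [h1.2] using this

theorem pvOrL_spec (l : List Int) (hl : ∀ r ∈ l, pvR16 r) :
    pvR16 (pvOrL l) ∧ pvEnc (pvOrL l) = (l.map pvEnc).foldl (· ||| ·) 0 := by
  have := pvFold_enc l 0 hl (by constructor <;> norm_num)
  simpa [pvOrL, pvEnc, PySem.Int.band] using this

theorem pvReduceOr_eq_orL (l : List Int) : pvReduceOr l = pvOrL l := by
  cases l with
  | nil => rfl
  | cons h t =>
    show t.foldl _ h = List.foldl _ (PySem.Int.bor 0 h) t
    rw [PySem.Int.bor_comm, PySem.Int.bor_zero]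

theorem pvNat_lor_absorb (a r : Nat) : r ||| (a ||| r) = a ||| r := by
  apply Nat.eq_of_testBit_eq; intro i
  simp only [Nat.testBit_lor]
  cases r.testBit i <;> cases a.testBit i <;> rfl

-- Nat-side: membership in a lor-fold is a sub-mask
theorem pvNat_sub_step (r a : Nat) (l : List Nat) (h : r ||| a = a) :
    r ||| l.foldl (· ||| ·) a = l.foldl (· ||| ·) a := by
  induction l generalizing a with
  | nil => exact h
  | cons x xs ih =>
    exact ih (a ||| x) (by rw [← Nat.lor_assoc, h])

theorem pvNat_mem_sub (r : Nat) (l : List Nat) (a : Nat) (h : r ∈ l) :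
    r ||| l.foldl (· ||| ·) a = l.foldl (· ||| ·) a := by
  induction l generalizing a with
  | nil => simp at h
  | cons x xs ih =>
    rcases List.mem_cons.mp h with rfl | h
    · exact pvNat_sub_step r (a ||| r) xs (pvNat_lor_absorb a r)
    · exact ih (a ||| x) h

-- Nat-side: a lor-fold of masks whose low 4 bits lie under m stays under m
theorem pvNat_good_fold (l : List Nat) (a mh : Nat) (hl : ∀ x ∈ l, (x &&& 15) ||| mh = mh)
    (ha : (a &&& 15) ||| mh = mh) : ((l.foldl (· ||| ·) a) &&& 15) ||| mh = mh := by
  induction l generalizing a with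
  | nil => exact ha
  | cons x xs ih =>
    refine ih (a ||| x) (fun y hy => hl y (List.mem_cons_of_mem _ hy)) ?_
    have hx := hl x (by simp)
    have hd : (a ||| x) &&& 15 = (a &&& 15) ||| (x &&& 15) := by
      apply Nat.eq_of_testBit_eq; intro i
      simp [Nat.testBit_and, Bool.and_or_distrib_right]
    rw [hd, Nat.lor_assoc, hx, ha]

-- counting a predicate along a sublist
theorem pvCount_sublist (p : Int → Bool) {c rows : List Int} (h : c.Sublist rows) :
    rows.countP p ≤ c.countP p + (rows.length - c.length) := by
  induction h with
  | slnil => simp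
  | cons a h ih =>
    have := h.length_le
    simp only [List.countP_cons, List.length_cons]
    split <;> omega
  | cons₂ a h ih =>
    have := h.length_le
    simp only [List.countP_cons, List.length_cons]
    split <;> omega

-- itertools.combinations = length-k subsequences
theorem pvMem_combs (xs : List Int) : ∀ (k : Nat) (c : List Int),
    c ∈ pvCombs k xs ↔ c.Sublist xs ∧ c.length = k := by
  induction xs with
  | nil =>
    intro k c
    cases k with
    | zero =>
      simp only [pvCombs, List.mem_singleton, List.sublist_nil]
      constructor
      · rintro rfl; exact ⟨rfl, rfl⟩
      · rintro ⟨rfl, _⟩; rfl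
    | succ k =>
      simp only [pvCombs, List.not_mem_nil, false_iff, not_and, List.sublist_nil]
      rintro rfl; simp
  | cons x xs ih =>
    intro k c
    cases k with
    | zero =>
      simp only [pvCombs, List.mem_singleton]
      constructor
      · rintro rfl; exact ⟨List.nil_sublist _, rfl⟩
      · rintro ⟨_, hl⟩; exact List.length_eq_zero_iff.mp hl
    | succ k =>
      simp only [pvCombs, List.mem_append, List.mem_map, ih]
      constructor
      · rintro (⟨c', ⟨hs, hl⟩, rfl⟩ | ⟨hs, hl⟩)
        · exact ⟨hs.cons₂ x, by simp [hl]⟩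
        · exact ⟨hs.cons x, hl⟩
      · rintro ⟨hs, hl⟩
        rcases List.sublist_cons_iff.mp hs with h | ⟨r, rfl, hr⟩
        · exact Or.inr ⟨h, hl⟩
        · exact Or.inl ⟨r, ⟨hr, by simpa using hl⟩, rfl⟩

-- the central correspondence: a size-(n-j) combination with popcount(OR) ≤ t exists
-- iff some 4-bit mask m with popcount(m) ≤ t leaves at most j rows uncovered
theorem pvMain (rows : List Int) (hR : ∀ r ∈ rows, pvR16 r) (j : Nat) (t : Int) :
    (∃ c ∈ pvCombs (rows.length - j) rows, pvBitAt (pvReduceOr c) ≤ t) ↔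
    (∃ m ∈ PySem.List.pyRange 0 16 1, pvBitAt m ≤ t ∧ (rows.countP (pvBad m) : Int) ≤ (j : Int)) := by
  constructor
  · rintro ⟨c, hc, ht⟩
    obtain ⟨hsub, hlen⟩ := (pvMem_combs rows _ c).mp hc
    have hcR : ∀ r ∈ c, pvR16 r := fun r hr => hR r (hsub.subset hr)
    obtain ⟨hvR, hvE⟩ := pvOrL_spec c hcR
    rw [pvReduceOr_eq_orL] at ht
    set v := pvOrL c with hv
    obtain ⟨hm0, hm1, hmp, hmE⟩ := pvFL2 v hvR
    refine ⟨PySem.Int.band v 15, pvMemRange _ hm0 hm1, by rw [hmp]; exact ht, ?_⟩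
    have hzero : c.countP (pvBad (PySem.Int.band v 15)) = 0 := by
      rw [List.countP_eq_zero]
      intro r hr
      rw [Bool.not_eq_true, pvFL3 r _ (hcR r hr) hm0 hm1, hmE]
      have hmem : pvEnc r ||| pvEnc v = pvEnc v := by
        rw [hvE]
        exact pvNat_mem_sub (pvEnc r) (c.map pvEnc) 0 (List.mem_map_of_mem hr)
      have hd : (pvEnc r ||| pvEnc v) &&& 15 = (pvEnc r &&& 15) ||| (pvEnc v &&& 15) := by
        apply Nat.eq_of_testBit_eq; intro i
        simp [Nat.testBit_and, Bool.and_or_distrib_right]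
      rw [← hd, hmem]
    have hcount := pvCount_sublist (pvBad (PySem.Int.band v 15)) hsub
    have hlc := hsub.length_le
    rw [hzero, hlen] at hcount
    omega
  · rintro ⟨m, hm, hpt, hcnt⟩
    obtain ⟨hm0, hm1, -, -, -⟩ := pvRangeBounds m hm
    set g := rows.filter (fun r => !(pvBad m r)) with hg
    set c := g.take (rows.length - j) with hc
    have hgsub : g.Sublist rows := List.filter_sublist
    have hcsub : c.Sublist rows := (List.take_sublist _ _).trans hgsub
    have hglen : g.length = rows.length - rows.countP (pvBad m) := by
      have h1 : rows.length = rows.countP (pvBad m) + rows.countP (fun r => !(pvBad m r)) :=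
        by have h0 := List.length_eq_countP_add_countP (p := pvBad m) (l := rows)
           simpa using h0
      have h2 : g.length = rows.countP (fun r => !(pvBad m r)) := by
        rw [hg, ← List.countP_eq_length_filter]
      omega
    have hcntN : rows.countP (pvBad m) ≤ j := by exact_mod_cast hcnt
    have hlen : c.length = rows.length - j := by
      rw [hc, List.length_take, hglen]
      omega
    refine ⟨c, (pvMem_combs rows _ c).mpr ⟨hcsub, hlen⟩, ?_⟩
    have hcR : ∀ r ∈ c, pvR16 r := fun r hr => hR r (hcsub.subset hr)
    obtain ⟨hvR, hvE⟩ := pvOrL_spec c hcR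
    rw [pvReduceOr_eq_orL]
    have hgood : ∀ x ∈ c.map pvEnc, (x &&& 15) ||| m.toNat = m.toNat := by
      intro x hx
      obtain ⟨r, hr, rfl⟩ := List.mem_map.mp hx
      have hrg : r ∈ g := List.mem_of_mem_take hr
      have : (pvBad m r) = false := by
        have := (List.mem_filter.mp (hg ▸ hrg)).2
        simpa using this
      exact (pvFL3 r m (hcR r hr) hm0 hm1).mp this
    have hfold := pvNat_good_fold (c.map pvEnc) 0 m.toNat hgood (by simp)
    rw [← hvE] at hfold
    exact le_trans (pvFL4 _ m hvR hm0 hm1 hfold) hpt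

-- A's last test, rewritten through pvMain at j = 0
theorem pvThird (rows : List Int) (hR : ∀ r ∈ rows, pvR16 r) :
    (pvBitAt (pvReduceOr rows) ≤ 3) ↔
    (∃ m ∈ PySem.List.pyRange 0 16 1, pvBitAt m ≤ 3 ∧ (rows.countP (pvBad m) : Int) ≤ ((0 : Nat) : Int)) := by
  rw [← pvMain rows hR 0 3]
  constructor
  · intro h
    exact ⟨rows, (pvMem_combs rows _ rows).mpr ⟨List.Sublist.refl _, by simp⟩, h⟩
  · rintro ⟨c, hc, ht⟩
    obtain ⟨hsub, hlen⟩ := (pvMem_combs rows _ c).mp hc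
    have : c = rows := hsub.eq_of_length (by simpa using hlen)
    rwa [this] at ht

-- ===== VERDICT (by name: the statement is the Claim_ definition above) =====
theorem on_3_lines_spec : Claim_equal_on_3_lines := by
  intro rows _ hpre
  show on_3_lines rows = on_3_lines_alt rows
  by_cases h3 : rows.length ≤ 3
  · simp [on_3_lines, on_3_lines_alt, h3]
  · have hR : ∀ r ∈ rows, pvR16 r := hpre.resolve_left h3
    rw [Bool.eq_iff_iff]
    have hE1 := pvMain rows hR 2 1
    have hE2 := pvMain rows hR 1 2
    have hE3 := pvThird rows hR
    have hB : on_3_lines_alt rows = true ↔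
        ∃ m ∈ PySem.List.pyRange 0 16 1,
          (rows.countP (pvBad m) : Int) ≤ 2 ∧
          (PySem.List.pyGet? pvPC m).getD 0 + (rows.countP (pvBad m) : Int) ≤ 3 := by
      have hcf : ∀ m : Int,
          (rows.filter (fun r => decide (PySem.Int.band (PySem.Int.band r (Int.not m)) 15 ≠ 0))).length
            = rows.countP (pvBad m) := by
        intro m
        rw [List.countP_eq_length_filter]
        rfl
      simp only [on_3_lines_alt, if_neg h3, List.any_eq_true, decide_eq_true_eq, hcf]
    have hA : on_3_lines rows = true ↔
        ((pvCombs (rows.length - 2) rows).any (fun c => decide (pvBitAt (pvReduceOr c) ≤ 1)) = true ∨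
         (pvCombs (rows.length - 1) rows).any (fun c => decide (pvBitAt (pvReduceOr c) ≤ 2)) = true ∨
         pvBitAt (pvReduceOr rows) ≤ 3) := by
      simp only [on_3_lines, if_neg h3]
      by_cases hc1 : (pvCombs (rows.length - 2) rows).any (fun c => decide (pvBitAt (pvReduceOr c) ≤ 1)) = true
      · simp [hc1]
      · by_cases hc2 : (pvCombs (rows.length - 1) rows).any (fun c => decide (pvBitAt (pvReduceOr c) ≤ 2)) = true
        · simp [hc1, hc2]
        · simp [hc1, hc2]
    rw [hA, hB]
    simp only [List.any_eq_true, decide_eq_true_eq] at *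
    constructor
    · rintro (h | h | h)
      · obtain ⟨m, hm, hp, hc⟩ := hE1.mp h
        obtain ⟨-, -, hp0, hp4, -⟩ := pvRangeBounds m hm
        exact ⟨m, hm, by omega, by rw [(pvRangeBounds m hm).2.2.2.2]; omega⟩
      · obtain ⟨m, hm, hp, hc⟩ := hE2.mp h
        obtain ⟨-, -, hp0, hp4, -⟩ := pvRangeBounds m hm
        have hc0 : (0 : Int) ≤ (rows.countP (pvBad m) : Int) := by positivity
        exact ⟨m, hm, by omega, by rw [(pvRangeBounds m hm).2.2.2.2]; omega⟩
      · obtain ⟨m, hm, hp, hc⟩ := hE3.mp h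
        obtain ⟨-, -, hp0, hp4, -⟩ := pvRangeBounds m hm
        have hc0 : (0 : Int) ≤ (rows.countP (pvBad m) : Int) := by positivity
        exact ⟨m, hm, by omega, by rw [(pvRangeBounds m hm).2.2.2.2]; omega⟩
    · rintro ⟨m, hm, hu, hs⟩
      obtain ⟨-, -, hp0, hp4, hpeq⟩ := pvRangeBounds m hm
      rw [hpeq] at hs
      have hc0 : (0 : Int) ≤ (rows.countP (pvBad m) : Int) := by positivity
      by_cases h1 : pvBitAt m ≤ 1
      · exact Or.inl (hE1.mpr ⟨m, hm, h1, hu⟩)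
      · by_cases h2 : pvBitAt m ≤ 2
        · exact Or.inr (Or.inl (hE2.mpr ⟨m, hm, h2, by omega⟩))
        · exact Or.inr (Or.inr (hE3.mpr ⟨m, hm, by omega, by omega⟩))
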